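-- pv_equiv track=rewrite | github.com/AaminaBokhari2/final | pipeline.py | _filter_and_rank_resources
-- ===== SOURCE A (Python) =====
-- from typing import Dict, List, Tuple, Any
-- from typing import Optional, Dict
-- from typing import List, Dict, Any, Tuple
-- from typing import Dict, List, Any, Tuple
-- from typing import List, Dict, Optional, Tuple
-- from typing import List, Dict, Tuple
--
-- def _filter_and_rank_resources(resources: List[Dict], keywords: List[str], topic: str) -> List[Dict]:
--     """Filter and rank web resources"""
--     if not resources:
--         return []
--
--     # Remove duplicates
--     unique_resources = []
--     seen_titles = set()
--
--     for resource in resources: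
--         title = resource.get('title', '').lower()
--         if title not in seen_titles:
--             seen_titles.add(title)
--             unique_resources.append(resource)
--
--     # Sort by quality score and relevance
--     quality_order = {'Excellent': 4, 'High': 3, 'Good': 2, 'Fair': 1}
--
--     def rank_score(resource):
--         quality = resource.get('quality_score', 'Fair')
--         base_score = quality_order.get(quality, 1)
--
--         # Boost score if title contains keywords or topic
--         title = resource.get('title', '').lower()
--         description = resource.get('description', '').lower()
--
--         relevance_boost = 0
--         if topic.lower() in title:
--             relevance_boost += 2
--
--         for keyword in keywords[:3]:
--             if keyword.lower() in title or keyword.lower() in description: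
--                 relevance_boost += 1
--
--         return base_score + relevance_boost
--
--     unique_resources.sort(key=rank_score, reverse=True)
--     return unique_resources
-- ===== SOURCE B (Python) =====
-- from typing import List, Dict
--
-- def _filter_and_rank_resources(resources: List[Dict], keywords: List[str], topic: str) -> List[Dict]:
--     """Dedup via an insertion-ordered dict keyed by lowercased title, score each
--     unique resource once, then emit them by descending score (9..1) with repeated
--     selection instead of a comparison sort."""
--     by_title = {}
--     for r in resources:
--         by_title.setdefault(r.get('title', '').lower(), r)
--
--     quality = {'Excellent': 4, 'High': 3, 'Good': 2, 'Fair': 1}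
--     tl = topic.lower()
--     kws = [k.lower() for k in keywords[:3]]
--
--     def score(r):
--         title = r.get('title', '').lower()
--         desc = r.get('description', '').lower()
--         return (quality.get(r.get('quality_score', 'Fair'), 1)
--                 + 2 * (tl in title)
--                 + sum(1 for kw in kws if kw in title or kw in desc))
--
--     scored = [(score(r), r) for r in by_title.values()]
--     return [r for s in range(9, 0, -1) for (sc, r) in scored if sc == s]
-- ===== Notes on version B (the rewrite author's own statement) =====
-- stated objective: alternative
-- what changed: B deduplicates through an insertion-ordered dict keyed by lowercased title (setdefault keeps the first occurrence), computes each rank score once into (score, resource) pairs, and produces the output by selecting scores 9 down to 1 in turn (the score always lies in 1..9), replacing A's seen-set/list dedup and stable comparison sort.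
import Mathlib
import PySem

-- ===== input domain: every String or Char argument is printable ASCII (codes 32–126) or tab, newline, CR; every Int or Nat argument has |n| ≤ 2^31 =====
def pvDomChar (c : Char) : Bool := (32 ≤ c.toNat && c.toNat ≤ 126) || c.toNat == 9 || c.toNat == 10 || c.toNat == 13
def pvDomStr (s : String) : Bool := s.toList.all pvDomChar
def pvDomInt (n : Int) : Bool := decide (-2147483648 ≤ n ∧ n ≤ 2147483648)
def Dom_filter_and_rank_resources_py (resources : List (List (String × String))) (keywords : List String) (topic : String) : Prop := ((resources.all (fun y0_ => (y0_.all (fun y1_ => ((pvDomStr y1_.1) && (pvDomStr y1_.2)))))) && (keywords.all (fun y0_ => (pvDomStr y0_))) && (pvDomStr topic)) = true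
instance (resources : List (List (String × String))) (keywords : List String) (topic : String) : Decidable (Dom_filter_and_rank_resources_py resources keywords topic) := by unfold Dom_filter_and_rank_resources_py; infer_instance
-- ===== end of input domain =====

set_option maxRecDepth 8000


-- B replaces A's seen-set/list dedup followed by a stable comparison sort with a dict-of-first-occurrences
-- dedup, a single scoring pass into (score, resource) pairs, and selection of scores 9 down to 1 in turn.

-- ===== PORT A =====
def pvQualityOrder : PySem.Dict String Int :=
  ⟨[("Excellent", 4), ("High", 3), ("Good", 2), ("Fair", 1)]⟩

def pvRankScore (keywords : List String) (topic : String) (resource : List (String × String)) : Int :=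
  let quality := PySem.Dict.getD ⟨resource⟩ "quality_score" "Fair"
  let baseScore := PySem.Dict.getD pvQualityOrder quality 1
  let title := PySem.Str.lower (PySem.Dict.getD ⟨resource⟩ "title" "")
  let description := PySem.Str.lower (PySem.Dict.getD ⟨resource⟩ "description" "")
  let boost : Int := if PySem.Str.isIn (PySem.Str.lower topic) title then 0 + 2 else 0
  let boost := (PySem.List.slice keywords none (some 3)).foldl
    (fun b kw => if PySem.Str.isIn (PySem.Str.lower kw) title || PySem.Str.isIn (PySem.Str.lower kw) description then b + 1 else b) boost
  baseScore + boost

def pvDedupStep (st : List (List (String × String)) × PySem.Set String)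
    (resource : List (String × String)) : List (List (String × String)) × PySem.Set String :=
  let title := PySem.Str.lower (PySem.Dict.getD ⟨resource⟩ "title" "")
  if st.2.contains title then st
  else (st.1 ++ [resource], PySem.Set.add st.2 title)

def filter_and_rank_resources_py (resources : List (List (String × String))) (keywords : List String) (topic : String) : List (List (String × String)) :=
  if resources = [] then []
  else
    let uniq := (resources.foldl pvDedupStep ([], PySem.Set.empty)).1
    PySem.List.sorted uniq (pvRankScore keywords topic) true

-- ===== PORT B =====
-- Source B's score(r): base + 2*(topic in title) + count of matching keywords (sum of a generator = countP)
def pvAltScore (topicL : String) (kws : List String) (r : List (String × String)) : Int :=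
  let title := PySem.Str.lower (PySem.Dict.getD ⟨r⟩ "title" "")
  let desc := PySem.Str.lower (PySem.Dict.getD ⟨r⟩ "description" "")
  PySem.Dict.getD pvQualityOrder (PySem.Dict.getD ⟨r⟩ "quality_score" "Fair") 1
    + 2 * (if PySem.Str.isIn topicL title then (1 : Int) else 0)
    + (kws.countP (fun kw => PySem.Str.isIn kw title || PySem.Str.isIn kw desc) : Int)

def filter_and_rank_resources_py_alt (resources : List (List (String × String))) (keywords : List String) (topic : String) : List (List (String × String)) :=
  let byTitle := resources.foldl
    (fun d r => d.setdefault (PySem.Str.lower (PySem.Dict.getD ⟨r⟩ "title" "")) r)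
    (PySem.Dict.empty : PySem.Dict String (List (String × String)))
  let topicL := PySem.Str.lower topic
  let kws := (PySem.List.slice keywords none (some 3)).map PySem.Str.lower
  let scored := byTitle.values.map (fun r => (pvAltScore topicL kws r, r))
  (PySem.List.pyRange 9 0 (-1)).flatMap
    (fun s => (scored.filter (fun p => p.1 == s)).map (fun p => p.2))

-- ===== PRECONDITION & SPEC =====
def Spec_filter_and_rank_resources_py (resources : List (List (String × String))) (keywords : List String) (topic : String) (out : List (List (String × String))) : Prop := out = filter_and_rank_resources_py_alt resources keywords topic
instance (resources : List (List (String × String))) (keywords : List String) (topic : String) (out : List (List (String × String))) : Decidable (Spec_filter_and_rank_resources_py resources keywords topic out) := by unfold Spec_filter_and_rank_resources_py; infer_instance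

-- ===== CLAIM =====
def Claim_equal_filter_and_rank_resources_py : Prop := ∀ (resources : List (List (String × String))) (keywords : List String) (topic : String), Dom_filter_and_rank_resources_py resources keywords topic → Spec_filter_and_rank_resources_py resources keywords topic (filter_and_rank_resources_py resources keywords topic)

-- ===== LEMMAS AND PROOFS =====

-- A's keyword fold counts matches: it equals its start plus a countP
theorem foldl_if_eq_countP {κ : Type} (p : κ → Bool) (l : List κ) (x : Int) :
    l.foldl (fun b kw => if p kw then b + 1 else b) x = x + (l.countP p : Int) := by
  induction l generalizing x with
  | nil => simp
  | cons k t ih =>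
      simp only [List.foldl_cons, List.countP_cons]
      by_cases h : p k = true
      · simp [h, ih]; ring
      · simp [h, ih]

theorem pvAltScore_eq (keywords : List String) (topic : String) (r : List (String × String)) :
    pvAltScore (PySem.Str.lower topic) ((PySem.List.slice keywords none (some 3)).map PySem.Str.lower) r
      = pvRankScore keywords topic r := by
  dsimp only [pvAltScore, pvRankScore]
  rw [List.countP_map, foldl_if_eq_countP]
  simp only [Function.comp_def]
  split_ifs with h <;> ring

-- the deduped sublist that a fold starting from `seen` still appends
def pvFresh (seen : PySem.Set String) : List (List (String × String)) → List (List (String × String))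
  | [] => []
  | r :: rs =>
      let title := PySem.Str.lower (PySem.Dict.getD ⟨r⟩ "title" "")
      if seen.contains title then pvFresh seen rs
      else r :: pvFresh (PySem.Set.add seen title) rs

theorem dedup_foldl_eq (resources : List (List (String × String)))
    (u : List (List (String × String))) (seen : PySem.Set String) :
    (resources.foldl pvDedupStep (u, seen)).1 = u ++ pvFresh seen resources := by
  induction resources generalizing u seen with
  | nil => simp [pvFresh]
  | cons r rs ih =>
      simp only [List.foldl_cons, pvDedupStep, pvFresh]
      by_cases h : PySem.Str.lower (PySem.Dict.getD ⟨r⟩ "title" "") ∈ seen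
      · simp [h, ih]
      · simp [h, ih, List.append_assoc]

-- B's setdefault loop collects the same first-occurrence resources, in order
theorem setdefault_foldl_values (resources : List (List (String × String)))
    (d : PySem.Dict String (List (String × String))) (seen : PySem.Set String)
    (hd : ∀ t, d.contains t = seen.contains t) :
    (resources.foldl
      (fun d r => d.setdefault (PySem.Str.lower (PySem.Dict.getD ⟨r⟩ "title" "")) r) d).values
      = d.values ++ pvFresh seen resources := by
  induction resources generalizing d seen with
  | nil => simp [pvFresh]
  | cons r rs ih =>
      simp only [List.foldl_cons, pvFresh]
      by_cases h : PySem.Str.lower (PySem.Dict.getD ⟨r⟩ "title" "") ∈ seen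
      · have hc : d.contains (PySem.Str.lower (PySem.Dict.getD ⟨r⟩ "title" "")) = true := by
          rw [hd]; simp [PySem.Set.contains, h]
        rw [PySem.Dict.setdefault_of_contains _ _ hc, ih d seen hd]
        simp [h]
      · have hc : d.contains (PySem.Str.lower (PySem.Dict.getD ⟨r⟩ "title" "")) = false := by
          rw [hd]; simp [PySem.Set.contains, h]
        rw [PySem.Dict.setdefault_of_not_contains _ _ hc]
        rw [ih _ (PySem.Set.add seen (PySem.Str.lower (PySem.Dict.getD ⟨r⟩ "title" "")))
          (fun t => by
            rw [PySem.Dict.contains_insert, hd]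
            by_cases ht : t = PySem.Str.lower (PySem.Dict.getD ⟨r⟩ "title" "") <;>
              simp [ht, PySem.Set.contains, PySem.Set.mem_add])]
        rw [show (d.insert (PySem.Str.lower (PySem.Dict.getD ⟨r⟩ "title" "")) r).values
              = d.values ++ [r] from by
            simp [PySem.Dict.values, PySem.Dict.items_insert_of_not_contains _ _ hc]]
        simp [h, List.append_assoc]

-- insertion into a descending bucket concatenation
theorem insertBy_append_not {α : Type} (before : α → α → Bool) (x : α) (l r : List α)
    (h : ∀ y ∈ l, before x y = false) :
    PySem.List.insertBy before x (l ++ r) = l ++ PySem.List.insertBy before x r := by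
  induction l with
  | nil => simp
  | cons y t ih =>
      have hy := h y (by simp)
      simp only [List.cons_append, PySem.List.insertBy, hy, Bool.false_eq_true, if_false]
      rw [ih (fun z hz => h z (by simp [hz]))]

theorem insertBy_all {α : Type} (before : α → α → Bool) (x : α) (r : List α)
    (h : ∀ z ∈ r, before x z = true) :
    PySem.List.insertBy before x r = x :: r := by
  cases r with
  | nil => rfl
  | cons z t => simp [PySem.List.insertBy, h z (by simp)]

theorem insertBy_rev_flatMap {α : Type} (key : α → Int) (x : α) (ss : List Int)
    (hss : ss.Pairwise (· > ·)) (hx : key x ∈ ss) (B : Int → List α)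
    (hB : ∀ s ∈ ss, ∀ y ∈ B s, key y = s) :
    PySem.List.insertBy (fun a b => decide (key b < key a)) x (ss.flatMap B)
      = ss.flatMap (fun s => B s ++ if key x == s then [x] else []) := by
  induction ss with
  | nil => simp at hx
  | cons s ss ih =>
      have hgt : ∀ s' ∈ ss, s > s' := (List.pairwise_cons.mp hss).1
      have hss' := (List.pairwise_cons.mp hss).2
      simp only [List.flatMap_cons]
      by_cases hxs : key x = s
      · rw [insertBy_append_not _ _ _ _ (fun y hy => by
            have := hB s (by simp) y hy
            simp [this, hxs])]
        rw [insertBy_all _ _ _ (fun z hz => by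
            obtain ⟨s', hs', hzB⟩ := List.mem_flatMap.mp hz
            have hks : key z = s' := hB s' (by simp [hs']) z hzB
            have := hgt s' hs'
            simp [hks, hxs]
            omega)]
        have htail : ss.flatMap (fun s' => B s' ++ if key x == s' then [x] else [])
            = ss.flatMap B := by
          rw [List.flatMap_def, List.flatMap_def]
          congr 1
          apply List.map_congr_left
          intro s' hs'
          have : (key x == s') = false := by
            have := hgt s' hs'; simp; omega
          simp [this]
        rw [htail]
        have : (key x == s) = true := by simp [hxs]
        simp [this]
      · have hx' : key x ∈ ss := by
          rcases List.mem_cons.mp hx with h | h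
          · exact absurd h hxs
          · exact h
        rw [insertBy_append_not _ _ _ _ (fun y hy => by
            have hky := hB s (by simp) y hy
            have : key x < s := by
              have := hgt _ hx'; omega
            simp [hky]; omega)]
        rw [ih hss' hx' (fun s' hs' => hB s' (by simp [hs']))]
        have : (key x == s) = false := by simp [hxs]
        simp [this]

theorem sorted_rev_eq_flatMap {α : Type} (key : α → Int) (ss : List Int)
    (hss : ss.Pairwise (· > ·)) (l : List α) (hl : ∀ r ∈ l, key r ∈ ss) :
    PySem.List.sorted l key true = ss.flatMap (fun s => l.filter (fun r => key r == s)) := by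
  induction l using List.reverseRecOn with
  | nil => simp [PySem.List.sorted, List.flatMap_def]
  | append_singleton t x ih =>
      rw [PySem.List.sorted_rev_eq_foldl_insertBy, List.foldl_append, List.foldl_cons,
        List.foldl_nil, ← PySem.List.sorted_rev_eq_foldl_insertBy,
        ih (fun r hr => hl r (by simp [hr]))]
      rw [insertBy_rev_flatMap key x ss hss (hl x (by simp))
        (fun s => t.filter (fun r => key r == s))
        (fun s _ y hy => by
          have := List.of_mem_filter hy
          simp_all)]
      rw [List.flatMap_def, List.flatMap_def]
      congr 1
      apply List.map_congr_left
      intro s _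
      rw [List.filter_append]
      by_cases h : key x = s <;> simp [h]

-- score bounds
theorem pvBase_bounds (q : String) :
    (1:Int) ≤ PySem.Dict.getD pvQualityOrder q 1 ∧ PySem.Dict.getD pvQualityOrder q 1 ≤ 4 := by
  simp only [pvQualityOrder, PySem.Dict.getD, PySem.Dict.get?, List.find?_cons]
  repeat' split
  all_goals simp_all

theorem pvRankScore_bounds (keywords : List String) (topic : String) (r : List (String × String)) :
    1 ≤ pvRankScore keywords topic r ∧ pvRankScore keywords topic r ≤ 9 := by
  dsimp only [pvRankScore]
  have hbase := pvBase_bounds (PySem.Dict.getD ⟨r⟩ "quality_score" "Fair")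
  have hlen : (PySem.List.slice keywords none (some 3)).length ≤ 3 := by
    rw [PySem.List.slice_to keywords (by norm_num)]
    simpa using List.length_take_le 3 keywords
  rw [foldl_if_eq_countP]
  set c := List.countP (fun kw => PySem.Str.isIn (PySem.Str.lower kw) (PySem.Str.lower (PySem.Dict.getD ⟨r⟩ "title" "")) || PySem.Str.isIn (PySem.Str.lower kw) (PySem.Str.lower (PySem.Dict.getD ⟨r⟩ "description" ""))) (PySem.List.slice keywords none (some 3)) with hcdef
  have hc : c ≤ (PySem.List.slice keywords none (some 3)).length := by
    rw [hcdef]; exact List.countP_le_length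
  split_ifs with htop <;> omega

-- the selection pass over scores 9..1 picks out exactly the descending stable sort
theorem flatMap_filter_scores (keywords : List String) (topic : String)
    (uniq : List (List (String × String))) :
    ([9, 8, 7, 6, 5, 4, 3, 2, 1] : List Int).flatMap
        (fun s => uniq.filter (fun r => pvRankScore keywords topic r == s))
      = PySem.List.sorted uniq (pvRankScore keywords topic) true := by
  rw [sorted_rev_eq_flatMap (pvRankScore keywords topic) [(9:Int),8,7,6,5,4,3,2,1]
    (by decide) uniq
    (fun r _ => by
      have := pvRankScore_bounds keywords topic r
      have h9 : pvRankScore keywords topic r = 1 ∨ pvRankScore keywords topic r = 2 ∨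
        pvRankScore keywords topic r = 3 ∨ pvRankScore keywords topic r = 4 ∨
        pvRankScore keywords topic r = 5 ∨ pvRankScore keywords topic r = 6 ∨
        pvRankScore keywords topic r = 7 ∨ pvRankScore keywords topic r = 8 ∨
        pvRankScore keywords topic r = 9 := by omega
      simp only [List.mem_cons, List.not_mem_nil, or_false]
      rcases h9 with h|h|h|h|h|h|h|h|h <;> simp [h])]

-- selecting score s from the (score, resource) pairs is filtering the resources by score
theorem scored_select {α : Type} (key : α → Int) (uniq : List α) (s : Int) :
    ((uniq.map (fun r => (key r, r))).filter (fun p => p.1 == s)).map (fun p => p.2)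
      = uniq.filter (fun r => key r == s) := by
  induction uniq with
  | nil => rfl
  | cons r t ih =>
      simp only [List.map_cons, List.filter_cons]
      by_cases h : key r = s <;> simp [h, ih]

-- ===== final assembly =====
theorem filter_and_rank_resources_py_spec : Claim_equal_filter_and_rank_resources_py := by
  unfold Claim_equal_filter_and_rank_resources_py
  intro resources keywords topic _
  unfold Spec_filter_and_rank_resources_py filter_and_rank_resources_py filter_and_rank_resources_py_alt
  dsimp only
  rw [setdefault_foldl_values resources PySem.Dict.empty PySem.Set.empty
    (fun t => by simp [PySem.Set.contains])]
  rw [show PySem.Dict.values (PySem.Dict.empty : PySem.Dict String (List (String × String))) = [] from rfl,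
    List.nil_append]
  rw [show PySem.List.pyRange 9 0 (-1) = ([9,8,7,6,5,4,3,2,1] : List Int) from by decide]
  have hsel : ∀ s : Int,
      (((pvFresh PySem.Set.empty resources).map (fun r => (pvAltScore (PySem.Str.lower topic)
          ((PySem.List.slice keywords none (some 3)).map PySem.Str.lower) r, r))).filter
            (fun p => p.1 == s)).map (fun p => p.2)
        = (pvFresh PySem.Set.empty resources).filter (fun r => pvRankScore keywords topic r == s) := by
    intro s
    rw [scored_select]
    exact List.filter_congr (fun r _ => by rw [pvAltScore_eq])
  by_cases hres : resources = []
  · subst hres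
    simp [pvFresh]
  · simp only [if_neg hres]
    rw [dedup_foldl_eq, List.nil_append, ← flatMap_filter_scores]
    simp only [List.flatMap_def]
    congr 1
    exact List.map_congr_left (fun s _ => (hsel s).symm)
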